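-- pv_equiv track=rewrite | github.com/Doldolee/MORE-CLEAR | dataset/util.py | impute_next_notes
-- ===== SOURCE A (Python) =====
-- def impute_next_notes(next_notes, notes, done, missing='no clinical note'):
--     """
--     next_notes: list of str, aligned with `done`, where next_notes[i] is the note at the next time step
--     notes:      list of str, aligned one step behind next_notes (so notes[i] is the “current” note for next_notes[i])
--     done:       list of bool/int, True (or 1) at the end of each episode, aligned with next_notes
--     missing:    the placeholder string indicating a missing clinical note
--
--     Returns a new list where each missing next_note is imputed by:
--       1) the current note at the same index, if available
--       2) else the most recent valid imputed note within the same episode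
--       3) else left as missing (if no valid note seen yet)
--     """
--     imputed = []
--     last_valid = None
--
--     for idx, (nxt, cur, is_done) in enumerate(zip(next_notes, notes, done)):
--         if nxt != missing:
--             imputed.append(nxt)
--             last_valid = nxt
--         else:
--             if cur != missing:
--                 imputed.append(cur)
--                 last_valid = cur
--             else:
--                 imputed.append(last_valid if last_valid is not None else missing)
--
--         if is_done:
--             last_valid = None
--
--     return imputed
-- ===== SOURCE B (Python) =====
-- def impute_next_notes(next_notes, notes, done, missing='no clinical note'):
--     # Index-based reformulation: no running state at all. For each position i,
--     # search backwards for the nearest position j <= i that carries a valid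
--     # candidate (next note, else current note), stopping at an episode boundary
--     # (a truthy done strictly before i); if none, the note stays missing.
--     n = min(len(next_notes), len(notes), len(done))
--
--     def candidate(j):
--         if next_notes[j] != missing:
--             return next_notes[j]
--         if notes[j] != missing:
--             return notes[j]
--         return None
--
--     out = []
--     for i in range(n):
--         val = missing
--         j = i
--         while True:
--             c = candidate(j)
--             if c is not None:
--                 val = c
--                 break
--             if j == 0 or done[j - 1]:
--                 break
--             j -= 1
--         out.append(val)
--     return out
-- ===== Notes on version B (the rewrite author's own statement) =====
-- stated objective: alternative
-- what changed: Replaces A's single stateful forward pass (running last_valid accumulator with resets) by a stateless index-based formulation: for each position, a backward search for the nearest index carrying a valid candidate note, stopping at an episode boundary.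
import Mathlib
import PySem

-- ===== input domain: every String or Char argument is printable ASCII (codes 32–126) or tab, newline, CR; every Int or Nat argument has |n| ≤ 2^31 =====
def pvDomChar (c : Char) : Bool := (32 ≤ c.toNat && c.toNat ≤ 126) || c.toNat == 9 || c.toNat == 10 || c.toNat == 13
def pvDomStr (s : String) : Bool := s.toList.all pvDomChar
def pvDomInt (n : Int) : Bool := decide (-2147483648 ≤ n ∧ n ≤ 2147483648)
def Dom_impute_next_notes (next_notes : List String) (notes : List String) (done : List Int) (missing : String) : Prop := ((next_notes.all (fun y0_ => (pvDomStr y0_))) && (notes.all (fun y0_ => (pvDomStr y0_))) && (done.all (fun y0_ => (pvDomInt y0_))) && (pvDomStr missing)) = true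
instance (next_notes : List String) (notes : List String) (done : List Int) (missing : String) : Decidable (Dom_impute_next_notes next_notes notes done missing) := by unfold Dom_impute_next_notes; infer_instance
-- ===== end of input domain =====

-- B replaces A's fused stateful loop by a stateless per-index backward search for the nearest valid note within the episode; alternative structure, O(n^2) worst case vs A's O(n).
-- ===== PORT A =====
def impute_next_notes (next_notes : List String) (notes : List String) (done : List Int) (missing : String) : List String :=
  -- for … in zip(next_notes, notes, done): fused branch updating (imputed, last_valid)
  ((next_notes.zip (notes.zip done)).foldl
    (fun (st : List String × Option String) t =>
      let nxt := t.1; let cur := t.2.1; let is_done := t.2.2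
      let st' :=
        if nxt ≠ missing then (st.1 ++ [nxt], some nxt)
        else if cur ≠ missing then (st.1 ++ [cur], some cur)
        else (st.1 ++ [st.2.getD missing], st.2)
      (st'.1, if is_done ≠ 0 then none else st'.2))
    ([], none)).1

-- ===== PORT B =====
-- candidate(j) of Source B; indexing ported with getD (exact: every access is in range, j < min of the lengths)
def noteCand (next_notes : List String) (notes : List String) (missing : String) (j : Nat) : Option String :=
  if next_notes.getD j "" ≠ missing then some (next_notes.getD j "")
  else if notes.getD j "" ≠ missing then some (notes.getD j "") else none

-- the inner while-loop of Source B, as structural recursion on the decreasing index j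
def scanBack (next_notes : List String) (notes : List String) (done : List Int) (missing : String) (j : Nat) : String :=
  match noteCand next_notes notes missing j with
  | some c => c
  | none =>
    match j with
    | 0 => missing
    | j' + 1 => if done.getD j' 0 ≠ 0 then missing else scanBack next_notes notes done missing j'
termination_by j

def impute_next_notes_alt (next_notes : List String) (notes : List String) (done : List Int) (missing : String) : List String :=
  let n := min next_notes.length (min notes.length done.length)
  (List.range n).map (fun i => scanBack next_notes notes done missing i)

-- ===== PRECONDITION & SPEC =====
def Spec_impute_next_notes (next_notes : List String) (notes : List String) (done : List Int) (missing : String) (out : List String) : Prop := out = impute_next_notes_alt next_notes notes done missing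
instance (next_notes : List String) (notes : List String) (done : List Int) (missing : String) (out : List String) : Decidable (Spec_impute_next_notes next_notes notes done missing out) := by unfold Spec_impute_next_notes; infer_instance

-- ===== CLAIM (what is proved, stated in full; the proofs are below) =====
def Claim_equal_impute_next_notes : Prop := ∀ (next_notes : List String) (notes : List String) (done : List Int) (missing : String), Dom_impute_next_notes next_notes notes done missing → Spec_impute_next_notes next_notes notes done missing (impute_next_notes next_notes notes done missing)

-- ===== LEMMAS AND PROOFS =====
-- last_valid of A at the start of step i, as a function of the index
def lastValidAux (next_notes : List String) (notes : List String) (done : List Int) (missing : String) : Nat → Option String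
  | 0 => none
  | j + 1 =>
    if done.getD j 0 ≠ 0 then none
    else (noteCand next_notes notes missing j).orElse (fun _ => lastValidAux next_notes notes done missing j)

-- A's output at index i
def outAux (next_notes : List String) (notes : List String) (done : List Int) (missing : String) (i : Nat) : String :=
  (noteCand next_notes notes missing i).getD ((lastValidAux next_notes notes done missing i).getD missing)

theorem outAux_eq_scanBack (next_notes : List String) (notes : List String) (done : List Int) (missing : String) :
    ∀ i, outAux next_notes notes done missing i = scanBack next_notes notes done missing i := by
  intro i
  induction i with
  | zero =>
    rw [scanBack]
    cases h : noteCand next_notes notes missing 0 <;> simp [outAux, lastValidAux, h]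

  | succ j ih =>
    rw [scanBack]
    cases h : noteCand next_notes notes missing (j + 1) with
    | some c => simp [outAux, h]
    | none =>
      by_cases hd : done[j]?.getD 0 = 0
      · cases hc : noteCand next_notes notes missing j <;>
          simp [outAux, lastValidAux, h, List.getD, hd, hc, Option.orElse, ← ih]
      · simp [outAux, lastValidAux, h, List.getD, hd]

theorem fold_take (next_notes : List String) (notes : List String) (done : List Int) (missing : String) :
    ∀ i, i ≤ (next_notes.zip (notes.zip done)).length →
      (((next_notes.zip (notes.zip done)).take i).foldl
        (fun (st : List String × Option String) t =>
          let nxt := t.1; let cur := t.2.1; let is_done := t.2.2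
          let st' :=
            if nxt ≠ missing then (st.1 ++ [nxt], some nxt)
            else if cur ≠ missing then (st.1 ++ [cur], some cur)
            else (st.1 ++ [st.2.getD missing], st.2)
          (st'.1, if is_done ≠ 0 then none else st'.2))
        ([], none))
      = ((List.range i).map (outAux next_notes notes done missing),
         lastValidAux next_notes notes done missing i) := by
  intro i
  induction i with
  | zero => intro _; simp [lastValidAux]
  | succ j ih =>
    intro hle
    have hj : j < (next_notes.zip (notes.zip done)).length := by omega
    have h1 : j < next_notes.length := by simp [List.length_zip] at hj; omega
    have h2 : j < notes.length := by simp [List.length_zip] at hj; omega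
    have h3 : j < done.length := by simp [List.length_zip] at hj; omega
    have hget : (next_notes.zip (notes.zip done))[j]? =
        some (next_notes.getD j "", (notes.getD j "", done.getD j 0)) := by
      rw [List.getElem?_eq_getElem hj]
      simp [List.getElem_zip, h1, h2, h3]
    rw [List.take_add_one, List.foldl_append, ih (by omega), hget]
    simp only [Option.toList_some, List.foldl_cons, List.foldl_nil]
    rw [List.range_succ, List.map_append]
    by_cases hx : next_notes[j]?.getD "" = missing
    · by_cases hc : notes[j]?.getD "" = missing <;>
        simp [outAux, lastValidAux, noteCand, List.getD, hx, hc, Option.orElse]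
    · simp [outAux, lastValidAux, noteCand, List.getD, hx, Option.orElse]

-- ===== VERDICT (by name: the statement is the Claim_ definition above) =====
theorem impute_next_notes_spec : Claim_equal_impute_next_notes := by
  intro next_notes notes done missing _
  unfold Spec_impute_next_notes impute_next_notes impute_next_notes_alt
  have hlen : (next_notes.zip (notes.zip done)).length
      = min next_notes.length (min notes.length done.length) := by
    simp [List.length_zip]
  have := fold_take next_notes notes done missing (next_notes.zip (notes.zip done)).length (le_refl _)
  rw [List.take_length] at this
  rw [this]
  simp only [hlen]
  exact List.map_congr_left (fun i _ => outAux_eq_scanBack next_notes notes done missing i)
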